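-- pv_equiv track=rewrite | github.com/alfredgamulo/advent_of_code | 2021/22/main.py | reboot
-- ===== SOURCE A (Python) =====
-- from dataclasses import dataclass
--
-- @dataclass(frozen=True)
-- class Cuboid:
--     x1: int
--     x2: int
--     y1: int
--     y2: int
--     z1: int
--     z2: int
--
--     def size(self):
--         return (self.x2 - self.x1) * (self.y2 - self.y1) * (self.z2 - self.z1)
--
--     def subtract(a, b):
--         if not (
--             a.x1 < b.x2
--             and a.x2 > b.x1
--             and a.y1 < b.y2
--             and a.y2 > b.y1
--             and a.z1 < b.z2
--             and a.z2 > b.z1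
--         ):
--             yield a
--         else:
--             b = Cuboid(
--                 min(max(b.x1, a.x1), a.x2),
--                 min(max(b.x2, a.x1), a.x2),
--                 min(max(b.y1, a.y1), a.y2),
--                 min(max(b.y2, a.y1), a.y2),
--                 min(max(b.z1, a.z1), a.z2),
--                 min(max(b.z2, a.z1), a.z2),
--             )
--
--             yield Cuboid(a.x1, b.x1, a.y1, a.y2, a.z1, a.z2)
--             yield Cuboid(b.x2, a.x2, a.y1, a.y2, a.z1, a.z2)
--             yield Cuboid(b.x1, b.x2, a.y1, b.y1, a.z1, a.z2)
--             yield Cuboid(b.x1, b.x2, b.y2, a.y2, a.z1, a.z2)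
--             yield Cuboid(b.x1, b.x2, b.y1, b.y2, a.z1, b.z1)
--             yield Cuboid(b.x1, b.x2, b.y1, b.y2, b.z2, a.z2)
--
-- def reboot(directions):
--     cubes = []
--     for (on, (x1, x2), (y1, y2), (z1, z2)) in directions:
--         cuboid = Cuboid(x1, x2 + 1, y1, y2 + 1, z1, z2 + 1)
--         cubes = [sub for cube in cubes for sub in cube.subtract(cuboid) if sub.size()]
--         if on:
--             cubes.append(cuboid)
--     return sum(map(Cuboid.size, cubes))
-- ===== SOURCE B (Python) =====
-- def _vol(b):
--     x1, x2, y1, y2, z1, z2 = b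
--     return (x2 - x1) * (y2 - y1) * (z2 - z1)
--
--
-- def _carve(a, b):
--     """Pieces of box a left after removing box b (half-open coords), zero-volume pieces dropped."""
--     ax1, ax2, ay1, ay2, az1, az2 = a
--     bx1, bx2, by1, by2, bz1, bz2 = b
--     if not (ax1 < bx2 and ax2 > bx1 and ay1 < by2 and ay2 > by1 and az1 < bz2 and az2 > bz1):
--         parts = [a]
--     else:
--         cx1 = min(max(bx1, ax1), ax2)
--         cx2 = min(max(bx2, ax1), ax2)
--         cy1 = min(max(by1, ay1), ay2)
--         cy2 = min(max(by2, ay1), ay2)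
--         cz1 = min(max(bz1, az1), az2)
--         cz2 = min(max(bz2, az1), az2)
--         parts = [
--             (ax1, cx1, ay1, ay2, az1, az2),
--             (cx2, ax2, ay1, ay2, az1, az2),
--             (cx1, cx2, ay1, cy1, az1, az2),
--             (cx1, cx2, cy2, ay2, az1, az2),
--             (cx1, cx2, cy1, cy2, az1, cz1),
--             (cx1, cx2, cy1, cy2, cz2, az2),
--         ]
--     return [p for p in parts if _vol(p)]
--
--
-- def reboot(directions):
--     boxes = [(on, (x1, x2 + 1, y1, y2 + 1, z1, z2 + 1))
--              for on, (x1, x2), (y1, y2), (z1, z2) in directions]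
--     total = 0
--     for i, (on, box) in enumerate(boxes):
--         if on:
--             frags = [box]
--             for _, later in boxes[i + 1:]:
--                 frags = [p for f in frags for p in _carve(f, later)]
--             total += sum(map(_vol, frags))
--     return total
-- ===== Notes on version B (the rewrite author's own statement) =====
-- stated objective: alternative
-- what changed: A maintains one global fragment list rebuilt across all instructions with new cuboids appended as it goes; B computes each 'on' cuboid's surviving volume independently, carving only that cuboid's own fragments against its later instructions and accumulating a running total (a different traversal of the same carve relation, no shared evolving state).
import Mathlib
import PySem

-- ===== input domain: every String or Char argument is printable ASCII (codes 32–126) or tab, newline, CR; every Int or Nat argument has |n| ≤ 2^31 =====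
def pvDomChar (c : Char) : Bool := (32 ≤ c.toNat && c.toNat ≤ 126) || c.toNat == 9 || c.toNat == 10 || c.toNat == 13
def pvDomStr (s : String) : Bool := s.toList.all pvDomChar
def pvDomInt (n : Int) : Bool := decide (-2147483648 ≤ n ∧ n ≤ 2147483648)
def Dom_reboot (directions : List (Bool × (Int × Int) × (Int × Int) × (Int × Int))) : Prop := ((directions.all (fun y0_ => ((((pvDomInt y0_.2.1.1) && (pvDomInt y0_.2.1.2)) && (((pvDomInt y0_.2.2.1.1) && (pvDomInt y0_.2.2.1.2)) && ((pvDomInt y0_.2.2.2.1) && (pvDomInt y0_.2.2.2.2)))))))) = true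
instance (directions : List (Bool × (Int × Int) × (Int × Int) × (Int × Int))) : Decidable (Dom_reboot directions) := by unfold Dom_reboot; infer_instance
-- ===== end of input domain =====

-- B restructures A's carving: instead of one global fragment list rebuilt across all instructions,
-- B sums each 'on' cuboid's surviving volume independently against only its later instructions (alternative traversal, same cost).

-- ===== PORT A =====
-- the frozen dataclass Cuboid
structure Cuboid where
  x1 : Int
  x2 : Int
  y1 : Int
  y2 : Int
  z1 : Int
  z2 : Int
deriving DecidableEq, Repr

def Cuboid.size (c : Cuboid) : Int := (c.x2 - c.x1) * (c.y2 - c.y1) * (c.z2 - c.z1)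

-- the generator 'subtract', collected into the list of its yields
def Cuboid.subtract (a b : Cuboid) : List Cuboid :=
  if ¬ (a.x1 < b.x2 ∧ a.x2 > b.x1 ∧ a.y1 < b.y2 ∧ a.y2 > b.y1 ∧ a.z1 < b.z2 ∧ a.z2 > b.z1) then
    [a]
  else
    let b' : Cuboid := ⟨min (max b.x1 a.x1) a.x2, min (max b.x2 a.x1) a.x2,
                        min (max b.y1 a.y1) a.y2, min (max b.y2 a.y1) a.y2,
                        min (max b.z1 a.z1) a.z2, min (max b.z2 a.z1) a.z2⟩
    [⟨a.x1, b'.x1, a.y1, a.y2, a.z1, a.z2⟩,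
     ⟨b'.x2, a.x2, a.y1, a.y2, a.z1, a.z2⟩,
     ⟨b'.x1, b'.x2, a.y1, b'.y1, a.z1, a.z2⟩,
     ⟨b'.x1, b'.x2, b'.y2, a.y2, a.z1, a.z2⟩,
     ⟨b'.x1, b'.x2, b'.y1, b'.y2, a.z1, b'.z1⟩,
     ⟨b'.x1, b'.x2, b'.y1, b'.y2, b'.z2, a.z2⟩]

def reboot (directions : List (Bool × (Int × Int) × (Int × Int) × (Int × Int))) : Int :=
  -- 'for … in directions' with the comprehension '[sub for cube in cubes for sub in cube.subtract(cuboid) if sub.size()]'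
  let cubes := directions.foldl
    (fun cubes d =>
      match d with
      | (on, (x1, x2), (y1, y2), (z1, z2)) =>
        let cuboid : Cuboid := ⟨x1, x2 + 1, y1, y2 + 1, z1, z2 + 1⟩
        let cubes := cubes.flatMap (fun cube => (cube.subtract cuboid).filter (fun sub => sub.size ≠ 0))
        if on then cubes ++ [cuboid] else cubes)
    []
  (cubes.map Cuboid.size).sum

-- ===== PORT B =====
-- B works on plain 6-tuples (x1, x2, y1, y2, z1, z2), half-open
abbrev PvBox := Int × Int × Int × Int × Int × Int

def pvVol : PvBox → Int
  | (x1, x2, y1, y2, z1, z2) => (x2 - x1) * (y2 - y1) * (z2 - z1)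

-- _carve: pieces of a left after removing b, zero-volume pieces dropped
def pvCarve (a b : PvBox) : List PvBox :=
  match a, b with
  | (ax1, ax2, ay1, ay2, az1, az2), (bx1, bx2, by1, by2, bz1, bz2) =>
    let parts :=
      if ¬ (ax1 < bx2 ∧ ax2 > bx1 ∧ ay1 < by2 ∧ ay2 > by1 ∧ az1 < bz2 ∧ az2 > bz1) then
        [a]
      else
        let cx1 := min (max bx1 ax1) ax2
        let cx2 := min (max bx2 ax1) ax2
        let cy1 := min (max by1 ay1) ay2
        let cy2 := min (max by2 ay1) ay2
        let cz1 := min (max bz1 az1) az2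
        let cz2 := min (max bz2 az1) az2
        [(ax1, cx1, ay1, ay2, az1, az2),
         (cx2, ax2, ay1, ay2, az1, az2),
         (cx1, cx2, ay1, cy1, az1, az2),
         (cx1, cx2, cy2, ay2, az1, az2),
         (cx1, cx2, cy1, cy2, az1, cz1),
         (cx1, cx2, cy1, cy2, cz2, az2)]
    parts.filter (fun p => pvVol p ≠ 0)

-- the outer 'for i, (on, box) in enumerate(boxes)' loop: 'rest' is boxes[i+1:], 'total' the accumulator — exact
def pvGo : List (Bool × PvBox) → Int → Int
  | [], total => total
  | (on, box) :: rest, total =>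
      pvGo rest
        (total +
          if on then
            (((rest.foldl (fun frags d => frags.flatMap (fun f => pvCarve f d.2)) [box]).map pvVol).sum)
          else 0)

def reboot_alt (directions : List (Bool × (Int × Int) × (Int × Int) × (Int × Int))) : Int :=
  let boxes := directions.map (fun d =>
    match d with
    | (on, (x1, x2), (y1, y2), (z1, z2)) => (on, (x1, x2 + 1, y1, y2 + 1, z1, z2 + 1)))
  pvGo boxes 0

-- ===== PRECONDITION & SPEC =====
def Spec_reboot (directions : List (Bool × (Int × Int) × (Int × Int) × (Int × Int))) (out : Int) : Prop := out = reboot_alt directions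
instance (directions : List (Bool × (Int × Int) × (Int × Int) × (Int × Int))) (out : Int) : Decidable (Spec_reboot directions out) := by unfold Spec_reboot; infer_instance

-- ===== CLAIM (what is proved, stated in full; the proofs are below) =====
def Claim_equal_reboot : Prop := ∀ (directions : List (Bool × (Int × Int) × (Int × Int) × (Int × Int))), Dom_reboot directions → Spec_reboot directions (reboot directions)

-- ===== LEMMAS AND PROOFS =====

-- bridge from A's Cuboid records to B's tuples
def pvConv (c : Cuboid) : PvBox := (c.x1, c.x2, c.y1, c.y2, c.z1, c.z2)

theorem pvVol_conv (c : Cuboid) : pvVol (pvConv c) = c.size := rfl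

theorem pvConv_filter (l : List Cuboid) :
    (l.filter (fun s => s.size ≠ 0)).map pvConv = (l.map pvConv).filter (fun p => pvVol p ≠ 0) := by
  induction l with
  | nil => rfl
  | cons c l ih =>
    simp only [ne_eq, decide_not] at ih ⊢
    simp only [List.filter_cons, List.map_cons]
    by_cases h : c.size = 0
    · simp [h, pvVol_conv, ih]
    · simp [h, pvVol_conv, ih]

theorem pvCarve_conv (a b : Cuboid) :
    pvCarve (pvConv a) (pvConv b) = ((a.subtract b).filter (fun s => s.size ≠ 0)).map pvConv := by
  rw [pvConv_filter]
  unfold pvCarve Cuboid.subtract pvConv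
  by_cases h : ¬ (a.x1 < b.x2 ∧ a.x2 > b.x1 ∧ a.y1 < b.y2 ∧ a.y2 > b.y1 ∧ a.z1 < b.z2 ∧ a.z2 > b.z1)
  · simp [h]
  · simp [h]

-- proof-side names for the two loop bodies
def pvStepA (cubes : List Cuboid) (d : Bool × (Int × Int) × (Int × Int) × (Int × Int)) : List Cuboid :=
  match d with
  | (on, (x1, x2), (y1, y2), (z1, z2)) =>
    let cuboid : Cuboid := ⟨x1, x2 + 1, y1, y2 + 1, z1, z2 + 1⟩
    let cubes := cubes.flatMap (fun cube => (cube.subtract cuboid).filter (fun sub => sub.size ≠ 0))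
    if on then cubes ++ [cuboid] else cubes

def pvStepB (frags : List PvBox) (d : Bool × PvBox) : List PvBox :=
  frags.flatMap (fun f => pvCarve f d.2)

def pvConvDir (d : Bool × (Int × Int) × (Int × Int) × (Int × Int)) : Bool × PvBox :=
  match d with
  | (on, (x1, x2), (y1, y2), (z1, z2)) => (on, (x1, x2 + 1, y1, y2 + 1, z1, z2 + 1))

-- B's surviving volume of one frontier, and B's total, in proof-friendly form
def pvG (frags : List PvBox) (ds : List (Bool × PvBox)) : Int :=
  ((ds.foldl pvStepB frags).map pvVol).sum

def pvGoSum : List (Bool × PvBox) → Int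
  | [] => 0
  | (on, box) :: rest => (if on then pvG [box] rest else 0) + pvGoSum rest

theorem pvGo_eq (ds : List (Bool × PvBox)) (t : Int) : pvGo ds t = t + pvGoSum ds := by
  have hb : (fun (frags : List PvBox) (d : Bool × PvBox) =>
      frags.flatMap (fun f => pvCarve f d.2)) = pvStepB := rfl
  induction ds generalizing t with
  | nil => simp [pvGo, pvGoSum]
  | cons d rest ih =>
    obtain ⟨on, box⟩ := d
    simp only [pvGo, pvGoSum, ih]
    cases on <;> simp [pvG, hb] <;> ring

theorem pvStepB_append (X Y : List PvBox) (d : Bool × PvBox) :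
    pvStepB (X ++ Y) d = pvStepB X d ++ pvStepB Y d := by
  simp [pvStepB]

theorem pvFoldB_append (ds : List (Bool × PvBox)) (X Y : List PvBox) :
    ds.foldl pvStepB (X ++ Y) = ds.foldl pvStepB X ++ ds.foldl pvStepB Y := by
  induction ds generalizing X Y with
  | nil => rfl
  | cons d rest ih => simp only [List.foldl_cons, pvStepB_append, ih]

theorem pvG_append (X Y : List PvBox) (ds : List (Bool × PvBox)) :
    pvG (X ++ Y) ds = pvG X ds + pvG Y ds := by
  simp [pvG, pvFoldB_append]

theorem pvG_nil (ds : List (Bool × PvBox)) : pvG [] ds = 0 := by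
  have h : ds.foldl pvStepB [] = [] := by
    induction ds with
    | nil => rfl
    | cons d rest ih => simpa [pvStepB] using ih
  simp [pvG, h]

theorem pvStepA_conv (L : List Cuboid) (d : Bool × (Int × Int) × (Int × Int) × (Int × Int)) :
    (pvStepA L d).map pvConv = pvStepB (L.map pvConv) (pvConvDir d) ++
      (if d.1 then [(pvConvDir d).2] else []) := by
  obtain ⟨on, ⟨x1, x2⟩, ⟨y1, y2⟩, ⟨z1, z2⟩⟩ := d
  simp only [pvStepA, pvConvDir, pvStepB]
  have hflat : (L.flatMap (fun cube =>
      (cube.subtract ⟨x1, x2 + 1, y1, y2 + 1, z1, z2 + 1⟩).filter (fun sub => sub.size ≠ 0))).map pvConv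
      = (L.map pvConv).flatMap (fun f => pvCarve f (x1, x2 + 1, y1, y2 + 1, z1, z2 + 1)) := by
    induction L with
    | nil => rfl
    | cons c l ih =>
      simp only [List.flatMap_cons, List.map_cons, List.map_append, ih]
      congr 1
      have := pvCarve_conv c ⟨x1, x2 + 1, y1, y2 + 1, z1, z2 + 1⟩
      simp [pvConv] at this ⊢
      rw [this]
  simp only [ne_eq, decide_not] at hflat
  by_cases h : on = true
  · simp [h, pvConv]
    exact hflat
  · simp [Bool.not_eq_true] at h
    simp [h]
    exact hflat

-- the main invariant: A's volume from any state L = B's volume of L's frontier + B's total over the rest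
theorem pvMain (ds : List (Bool × (Int × Int) × (Int × Int) × (Int × Int))) (L : List Cuboid) :
    ((ds.foldl pvStepA L).map Cuboid.size).sum
      = pvG (L.map pvConv) (ds.map pvConvDir) + pvGoSum (ds.map pvConvDir) := by
  induction ds generalizing L with
  | nil =>
    simp [pvG, pvGoSum]
    induction L with
    | nil => rfl
    | cons c l ih => simp [ih, pvVol_conv]
  | cons d rest ih =>
    simp only [List.foldl_cons, List.map_cons]
    rw [ih (pvStepA L d)]
    have hG : pvG ((pvStepA L d).map pvConv) (rest.map pvConvDir)
        = pvG (pvStepB (L.map pvConv) (pvConvDir d)) (rest.map pvConvDir)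
          + (if d.1 then pvG [(pvConvDir d).2] (rest.map pvConvDir) else 0) := by
      rw [pvStepA_conv]
      by_cases h : d.1 = true
      · simp [h, pvG_append]
      · simp [Bool.not_eq_true] at h
        simp [h]
    rw [hG]
    have hgs : pvGoSum (pvConvDir d :: rest.map pvConvDir)
        = (if d.1 then pvG [(pvConvDir d).2] (rest.map pvConvDir) else 0)
          + pvGoSum (rest.map pvConvDir) := by
      obtain ⟨on, ⟨x1, x2⟩, ⟨y1, y2⟩, ⟨z1, z2⟩⟩ := d
      simp [pvGoSum, pvConvDir]
    rw [hgs]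
    have hfold : pvG (L.map pvConv) (pvConvDir d :: rest.map pvConvDir)
        = pvG (pvStepB (L.map pvConv) (pvConvDir d)) (rest.map pvConvDir) := by
      simp [pvG]
    rw [hfold]
    ring

-- ===== VERDICT (by name: the statement is the Claim_ definition above) =====
theorem reboot_spec : Claim_equal_reboot := by
  intro directions _
  unfold Spec_reboot
  have ha : reboot directions = ((directions.foldl pvStepA []).map Cuboid.size).sum := rfl
  have hb : reboot_alt directions = pvGo (directions.map pvConvDir) 0 := rfl
  rw [ha, hb, pvGo_eq, pvMain]
  simp [pvG_nil]
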